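-- pv_equiv track=rewrite | github.com/gselez6761/earnings-research-agent | push_transcript_to_db.py | build_qa_exchanges
-- ===== SOURCE A (Python) =====
-- def build_qa_exchanges(turns):
--     exchanges, current = [], []
--     for t in turns:
--         if t["speaker"].lower() == "operator":
--             if current:
--                 exchanges.append(current)
--                 current = []
--         else:
--             current.append(t)
--     if current:
--         exchanges.append(current)
--     return exchanges
-- ===== SOURCE B (Python) =====
-- def build_qa_exchanges(turns):
--     n = len(turns)
--     ops = [i for i, t in enumerate(turns) if t["speaker"].lower() == "operator"]
--     bounds = [-1] + ops + [n]
--     return [turns[a + 1:b] for a, b in zip(bounds, bounds[1:]) if b - a > 1]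
-- ===== Notes on version B (the rewrite author's own statement) =====
-- stated objective: alternative
-- what changed: Replaces the accumulator-and-flush loop with two staged passes: first collect the indices of operator turns, then slice the turn list between consecutive operator boundaries and keep the non-empty slices.
import Mathlib
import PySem

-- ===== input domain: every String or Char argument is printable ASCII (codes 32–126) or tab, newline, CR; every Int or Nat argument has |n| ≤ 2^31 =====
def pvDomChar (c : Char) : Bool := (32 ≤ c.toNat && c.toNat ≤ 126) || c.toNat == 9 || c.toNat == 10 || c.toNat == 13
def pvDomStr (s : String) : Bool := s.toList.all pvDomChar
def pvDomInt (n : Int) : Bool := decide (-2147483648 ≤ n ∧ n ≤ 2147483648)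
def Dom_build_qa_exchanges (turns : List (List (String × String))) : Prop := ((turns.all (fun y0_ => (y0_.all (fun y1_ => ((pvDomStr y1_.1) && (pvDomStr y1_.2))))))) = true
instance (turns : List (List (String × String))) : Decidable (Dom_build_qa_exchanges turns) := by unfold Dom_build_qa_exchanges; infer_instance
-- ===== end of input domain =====

-- B replaces A's accumulator-and-flush loop with two staged passes: collect the
-- indices of operator turns, then slice the turn list between consecutive
-- operator boundaries, keeping the non-empty slices; same cost, different shape.

-- t["speaker"].lower() == "operator"  (first-match association-list lookup; Pre_ guarantees the key exists)
def pvIsOp (t : List (String × String)) : Bool :=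
  PySem.Str.lower (((t.find? (fun kv => kv.1 == "speaker")).map Prod.snd).getD "") == "operator"

-- ===== PORT A =====
def pvStepA (st : List (List (List (String × String))) × List (List (String × String)))
    (t : List (String × String)) :
    List (List (List (String × String))) × List (List (String × String)) :=
  if pvIsOp t then
    if st.2 ≠ [] then (st.1 ++ [st.2], []) else st
  else
    (st.1, st.2 ++ [t])

def build_qa_exchanges (turns : List (List (String × String))) : List (List (List (String × String))) :=
  let st := turns.foldl pvStepA ([], [])
  if st.2 ≠ [] then st.1 ++ [st.2] else st.1

-- ===== PORT B =====
-- n = len(turns); ops = [i for i, t in enumerate(turns) if isop(t)];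
-- bounds = [-1] + ops + [n]; return [turns[a+1:b] for a, b in zip(bounds, bounds[1:]) if b - a > 1]
def build_qa_exchanges_alt (turns : List (List (String × String))) : List (List (List (String × String))) :=
  let n : Int := turns.length
  let ops : List Int := ((PySem.List.enumerate turns 0).filter (fun p => pvIsOp p.2)).map (fun p => p.1)
  let bounds : List Int := [-1] ++ ops ++ [n]
  ((bounds.zip (PySem.List.slice bounds (some 1) none)).filter (fun p => p.2 - p.1 > 1)).map
    (fun p => PySem.List.slice turns (some (p.1 + 1)) (some p.2))

-- ===== PRECONDITION & SPEC =====
-- Pre_ excludes turns lacking a "speaker" key, on which both Pythons raise KeyError.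
def Pre_build_qa_exchanges (turns : List (List (String × String))) : Prop :=
  ∀ t ∈ turns, (t.find? (fun kv => kv.1 == "speaker")).isSome
instance (turns : List (List (String × String))) : Decidable (Pre_build_qa_exchanges turns) := by
  unfold Pre_build_qa_exchanges; infer_instance

def pvWitness_build_qa_exchanges : (List (List (String × String))) :=
  [[("speaker", "Operator"), ("text", "hi")], [("speaker", "Alice"), ("text", "q")]]

def Spec_build_qa_exchanges (turns : List (List (String × String))) (out : List (List (List (String × String)))) : Prop := out = build_qa_exchanges_alt turns
instance (turns : List (List (String × String))) (out : List (List (List (String × String)))) : Decidable (Spec_build_qa_exchanges turns out) := by unfold Spec_build_qa_exchanges; infer_instance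

-- ===== CLAIM (what is proved, stated in full; the proofs are below) =====
def Claim_equal_build_qa_exchanges : Prop := ∀ (turns : List (List (String × String))), Dom_build_qa_exchanges turns → Pre_build_qa_exchanges turns → Spec_build_qa_exchanges turns (build_qa_exchanges turns)

-- ===== LEMMAS AND PROOFS =====

-- ---- proof-side middle ground: maximal runs keyed by is-operator ----
def pvTakeRun (k : Bool) : List (List (String × String)) →
    List (List (String × String)) × List (List (String × String))
  | [] => ([], [])
  | t :: ts =>
    if pvIsOp t = k then
      let r := pvTakeRun k ts
      (t :: r.1, r.2)
    else ([], t :: ts)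

theorem pvTakeRun_len (k : Bool) (l : List (List (String × String))) :
    (pvTakeRun k l).2.length ≤ l.length := by
  induction l with
  | nil => simp [pvTakeRun]
  | cons t ts ih =>
    simp only [pvTakeRun]
    split
    · simpa using Nat.le_succ_of_le ih
    · simp

def pvGroups : List (List (String × String)) → List (Bool × List (List (String × String)))
  | [] => []
  | t :: ts =>
    let r := pvTakeRun (pvIsOp t) ts
    (pvIsOp t, t :: r.1) :: pvGroups r.2
termination_by l => l.length
decreasing_by exact Nat.lt_succ_of_le (pvTakeRun_len _ _)

def pvGF (turns : List (List (String × String))) : List (List (List (String × String))) :=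
  (pvGroups turns).foldl (fun result g => if g.1 then result else result ++ [g.2]) []

def pvFinish (st : List (List (List (String × String))) × List (List (String × String))) :
    List (List (List (String × String))) :=
  if st.2 ≠ [] then st.1 ++ [st.2] else st.1

theorem pvGroups_cons (t : List (String × String)) (ts : List (List (String × String))) :
    pvGroups (t :: ts) =
      (pvIsOp t, t :: (pvTakeRun (pvIsOp t) ts).1) :: pvGroups (pvTakeRun (pvIsOp t) ts).2 := by
  rw [pvGroups]

theorem pvShift (ts : List (List (String × String)))
    (ex : List (List (List (String × String)))) (cur : List (List (String × String))) :
    pvFinish (ts.foldl pvStepA (ex, cur)) = ex ++ pvFinish (ts.foldl pvStepA ([], cur)) := by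
  induction ts generalizing ex cur with
  | nil => by_cases h : cur = [] <;> simp [pvFinish, h]
  | cons t ts ih =>
    simp only [List.foldl_cons, pvStepA]
    by_cases hop : pvIsOp t
    · by_cases hc : cur = []
      · subst hc
        simp only [hop, if_true, ne_eq, not_true_eq_false, not_false_eq_true, ite_false,
          not_not, reduceIte]
        exact ih ex []
      · simp only [hop, if_true, ne_eq, hc, not_false_eq_true, ite_true, List.nil_append]
        rw [ih (ex ++ [cur]) [], ih [cur] []]
        simp
    · simp only [hop, Bool.false_eq_true, ite_false]
      exact ih ex (cur ++ [t])

theorem pvFold_ops (l : List (List (String × String))) (ex : List (List (List (String × String)))) :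
    (∀ t ∈ l, pvIsOp t = true) → l.foldl pvStepA (ex, []) = (ex, []) := by
  induction l with
  | nil => intro _; rfl
  | cons t ts ih =>
    intro hall
    simp only [List.foldl_cons, pvStepA, hall t (by simp), if_true, ne_eq,
      not_true_eq_false, not_false_eq_true, ite_false, not_not, reduceIte]
    exact ih (fun u hu => hall u (by simp [hu]))

theorem pvFold_nonops (l : List (List (String × String))) :
    (∀ t ∈ l, pvIsOp t = false) →
    ∀ (ex : List (List (List (String × String)))) (cur : List (List (String × String))),
    l.foldl pvStepA (ex, cur) = (ex, cur ++ l) := by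
  induction l with
  | nil => intro _ ex cur; simp
  | cons t ts ih =>
    intro hall ex cur
    simp only [List.foldl_cons, pvStepA, hall t (by simp), Bool.false_eq_true, ite_false]
    rw [ih (fun u hu => hall u (by simp [hu])) ex (cur ++ [t])]
    simp

theorem pvTakeRun_split (k : Bool) (l : List (List (String × String))) :
    (pvTakeRun k l).1 ++ (pvTakeRun k l).2 = l := by
  induction l with
  | nil => rfl
  | cons t ts ih =>
    simp only [pvTakeRun]
    split
    · simpa using ih
    · simp

theorem pvTakeRun_all (k : Bool) (l : List (List (String × String))) :
    ∀ t ∈ (pvTakeRun k l).1, pvIsOp t = k := by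
  induction l with
  | nil => simp [pvTakeRun]
  | cons t ts ih =>
    simp only [pvTakeRun]
    split
    · rename_i h
      intro u hu
      simp only [List.mem_cons] at hu
      rcases hu with rfl | hu
      · exact h
      · exact ih u hu
    · simp

theorem pvTakeRun_rest (k : Bool) (l : List (List (String × String))) :
    (pvTakeRun k l).2 = [] ∨ ∃ u rest, (pvTakeRun k l).2 = u :: rest ∧ pvIsOp u ≠ k := by
  induction l with
  | nil => left; rfl
  | cons t ts ih =>
    simp only [pvTakeRun]
    split
    · exact ih
    · rename_i h
      right; exact ⟨t, ts, rfl, h⟩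

theorem pvGF_fold_shift (gs : List (Bool × List (List (String × String))))
    (acc : List (List (List (String × String)))) :
    gs.foldl (fun result g => if g.1 then result else result ++ [g.2]) acc =
      acc ++ gs.foldl (fun result g => if g.1 then result else result ++ [g.2]) [] := by
  induction gs generalizing acc with
  | nil => simp
  | cons g gs ih =>
    simp only [List.foldl_cons]
    by_cases h : g.1
    · simp only [h, if_true]
      exact ih acc
    · simp only [h, Bool.false_eq_true, ite_false, List.nil_append]
      rw [ih (acc ++ [g.2]), ih [g.2]]
      simp

theorem pvFlush (rem : List (List (String × String))) (cur : List (List (String × String)))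
    (hc : cur ≠ [])
    (hrem : rem = [] ∨ ∃ u rest, rem = u :: rest ∧ pvIsOp u = true) :
    pvFinish (rem.foldl pvStepA ([], cur)) = cur :: pvFinish (rem.foldl pvStepA ([], [])) := by
  rcases hrem with rfl | ⟨u, rest, rfl, hu⟩
  · simp [pvFinish, hc]
  · simp only [List.foldl_cons, pvStepA, hu, if_true, hc, ne_eq, not_false_eq_true, ite_true,
      not_true_eq_false, ite_false, not_not, reduceIte, List.nil_append]
    rw [pvShift rest [cur] []]
    simp

theorem pvGF_group_cons (t : List (String × String)) (rest : List (List (String × String))) :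
    pvGF (t :: rest) =
      (if pvIsOp t then pvGF (pvTakeRun (pvIsOp t) rest).2
       else (t :: (pvTakeRun (pvIsOp t) rest).1) :: pvGF (pvTakeRun (pvIsOp t) rest).2) := by
  unfold pvGF
  rw [pvGroups_cons, List.foldl_cons]
  by_cases hop : pvIsOp t
  · rw [if_pos hop, if_pos hop]
  · rw [if_neg hop, if_neg hop, List.nil_append, pvGF_fold_shift]
    simp

theorem pvMainA (n : Nat) : ∀ (ts : List (List (String × String))), ts.length ≤ n →
    pvFinish (ts.foldl pvStepA ([], [])) = pvGF ts := by
  induction n with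
  | zero =>
    intro ts h
    have : ts = [] := List.eq_nil_of_length_eq_zero (Nat.le_zero.mp h)
    subst this
    simp [pvGF, pvGroups, pvFinish]
  | succ n ih =>
    intro ts h
    match ts with
    | [] => simp [pvGF, pvGroups, pvFinish]
    | t :: rest =>
      have hlen : rest.length ≤ n := by simpa using h
      have hremlen : (pvTakeRun (pvIsOp t) rest).2.length ≤ n :=
        le_trans (pvTakeRun_len _ _) hlen
      have hsplit := pvTakeRun_split (pvIsOp t) rest
      set r := (pvTakeRun (pvIsOp t) rest).1 with hr
      set rem := (pvTakeRun (pvIsOp t) rest).2 with hrem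
      have hgroups := pvGF_group_cons t rest
      rw [← hr, ← hrem] at hgroups
      by_cases hop : pvIsOp t
      · have hallop : ∀ u ∈ t :: r, pvIsOp u = true := by
          intro u hu
          rcases List.mem_cons.mp hu with rfl | hu
          · exact hop
          · rw [hr] at hu; rw [pvTakeRun_all (pvIsOp t) rest u hu, hop]
        have hfold : (t :: rest).foldl pvStepA ([], []) = rem.foldl pvStepA ([], []) := by
          have he : t :: rest = (t :: r) ++ rem := by simp [hsplit]
          rw [he, List.foldl_append, pvFold_ops _ _ hallop]
        rw [hfold, ih rem hremlen, hgroups, if_pos hop]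
      · have hallno : ∀ u ∈ t :: r, pvIsOp u = false := by
          intro u hu
          rcases List.mem_cons.mp hu with rfl | hu
          · simpa using hop
          · rw [hr] at hu; rw [pvTakeRun_all (pvIsOp t) rest u hu]; simpa using hop
        have h1 : (t :: rest).foldl pvStepA ([], []) = rem.foldl pvStepA ([], t :: r) := by
          have he : t :: rest = (t :: r) ++ rem := by simp [hsplit]
          rw [he, List.foldl_append, pvFold_nonops _ hallno]
          simp
        have hrest : rem = [] ∨ ∃ u rest', rem = u :: rest' ∧ pvIsOp u = true := by
          rcases pvTakeRun_rest (pvIsOp t) rest with hnil | ⟨u, rest', heq, hne⟩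
          · left; rw [hrem]; exact hnil
          · right
            refine ⟨u, rest', by rw [hrem]; exact heq, ?_⟩
            simp only [hop] at hne
            simpa using hne
        rw [h1, pvFlush rem (t :: r) (by simp) hrest, ih rem hremlen, hgroups, if_neg hop]

-- ---- the slice side: B equals the run decomposition ----

def pvOps (l : List (List (String × String))) (s : Int) : List Int :=
  ((PySem.List.enumerate l s).filter (fun p => pvIsOp p.2)).map (fun p => p.1)

def pvP (l : List (List (String × String))) (bs : List Int) : List (List (List (String × String))) :=
  ((bs.zip bs.tail).filter (fun p => p.2 - p.1 > 1)).map
    (fun p => PySem.List.slice l (some (p.1 + 1)) (some p.2))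

theorem pvAlt_eq_pvP (turns : List (List (String × String))) :
    build_qa_exchanges_alt turns = pvP turns ((-1) :: pvOps turns 0 ++ [(turns.length : Int)]) := by
  simp [build_qa_exchanges_alt, pvP, pvOps, PySem.List.slice_from_one]


theorem pvOps_cons (t : List (String × String)) (l : List (List (String × String))) (s : Int) :
    pvOps (t :: l) s = (if pvIsOp t then [s] else []) ++ pvOps l (s + 1) := by
  simp only [pvOps, PySem.List.enumerate_cons, List.filter_cons]
  by_cases h : pvIsOp t <;> simp [h]


theorem pvOps_shift (l : List (List (String × String))) (s : Int) :
    pvOps l (s + 1) = (pvOps l s).map (· + 1) := by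
  induction l generalizing s with
  | nil => simp [pvOps, PySem.List.enumerate_nil]
  | cons t ts ih =>
    rw [pvOps_cons, pvOps_cons, ih (s + 1)]
    split <;> simp


theorem pvOps_shiftn (l : List (List (String × String))) (s : Int) (m : Nat) :
    pvOps l (s + (m : Int)) = (pvOps l s).map (· + (m : Int)) := by
  induction m with
  | zero => simp
  | succ k ihk =>
    have h1 : s + (((k : Nat) + 1 : Nat) : Int) = (s + (k : Int)) + 1 := by push_cast; ring
    rw [h1, pvOps_shift, ihk, List.map_map]
    apply List.map_congr_left
    intro x _
    simp only [Function.comp_apply]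
    push_cast
    ring

theorem pvOps_nonneg (l : List (List (String × String))) (s : Int) (hs : 0 ≤ s) :
    ∀ b ∈ pvOps l s, s ≤ b := by
  induction l generalizing s with
  | nil => simp [pvOps, PySem.List.enumerate_nil]
  | cons t ts ih =>
    rw [pvOps_cons]
    intro b hb
    rcases List.mem_append.mp hb with h1 | h1
    · split at h1 <;> simp_all
    · exact le_trans (by omega) (ih (s + 1) (by omega) b h1)


theorem pvOps_append (u l : List (List (String × String))) (s : Int) :
    pvOps (u ++ l) s = pvOps u s ++ pvOps l (s + u.length) := by
  induction u generalizing s with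
  | nil => simp [pvOps, PySem.List.enumerate_nil]
  | cons t ts ih =>
    rw [List.cons_append, pvOps_cons, pvOps_cons, ih (s + 1)]
    simp only [List.length_cons]
    have : s + 1 + (ts.length : Int) = s + ((ts.length : Int) + 1) := by ring
    rw [this]
    push_cast
    simp [List.append_assoc]


theorem pvOps_none (u : List (List (String × String))) (s : Int)
    (h : ∀ t ∈ u, pvIsOp t = false) : pvOps u s = [] := by
  induction u generalizing s with
  | nil => simp [pvOps, PySem.List.enumerate_nil]
  | cons t ts ih =>
    rw [pvOps_cons, h t (by simp), if_neg (by simp), List.nil_append]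
    exact ih (s + 1) (fun u hu => h u (by simp [hu]))


theorem pvSlice_cons (t : List (String × String)) (l : List (List (String × String)))
    (i j : Int) (hi : 0 ≤ i) (hj : 0 ≤ j) :
    PySem.List.slice (t :: l) (some (i + 1)) (some (j + 1)) = PySem.List.slice l (some i) (some j) := by
  rw [PySem.List.slice_toNat _ (by omega) (by omega),
      PySem.List.slice_toNat _ hi hj]
  have h1 : (i + 1).toNat = i.toNat + 1 := by omega
  have h2 : (j + 1).toNat = j.toNat + 1 := by omega
  rw [h1, h2]
  simp [List.drop_succ_cons]


theorem pvP_head (l : List (List (String × String))) (a b : Int) (rest : List Int) :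
    pvP l (a :: b :: rest) =
      (if b - a > 1 then [PySem.List.slice l (some (a + 1)) (some b)] else []) ++ pvP l (b :: rest) := by
  simp only [pvP, List.tail_cons, List.zip_cons_cons, List.filter_cons]
  split <;> rename_i hg <;> simp_all


theorem pvP_shift1 (t : List (String × String)) (l : List (List (String × String)))
    (bs : List Int) (h : ∀ b ∈ bs, -1 ≤ b) :
    pvP (t :: l) (bs.map (· + 1)) = pvP l bs := by
  induction bs with
  | nil => simp [pvP]
  | cons a bs ih =>
    cases bs with
    | nil => simp [pvP]
    | cons b rest =>
      have ha : -1 ≤ a := h a (by simp)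
      have hb : -1 ≤ b := h b (by simp)
      have hih := ih (fun x hx => h x (by simp [hx]))
      simp only [List.map_cons] at hih ⊢
      rw [pvP_head, pvP_head, hih]
      by_cases hg : b - a > 1
      · rw [if_pos (by omega), if_pos hg, pvSlice_cons t l (a + 1) b (by omega) (by omega)]
      · rw [if_neg (by omega), if_neg hg]


theorem pvP_append (u l : List (List (String × String))) (bs : List Int)
    (h : ∀ b ∈ bs, -1 ≤ b) :
    pvP (u ++ l) (bs.map (· + (u.length : Int))) = pvP l bs := by
  induction u with
  | nil => simp
  | cons t u ih =>
    have hmap : bs.map (· + ((t :: u).length : Int)) =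
        (bs.map (· + (u.length : Int))).map (· + 1) := by
      rw [List.map_map]
      apply List.map_congr_left
      intro x _
      simp only [Function.comp_apply, List.length_cons]
      push_cast
      ring
    have hmem : ∀ b ∈ bs.map (· + (u.length : Int)), -1 ≤ b := by
      intro b hb
      rcases List.mem_map.mp hb with ⟨x, hx, rfl⟩
      have := h x hx
      omega
    rw [hmap, List.cons_append, pvP_shift1 t (u ++ l) _ hmem, ih]


theorem pvAlt_op (t : List (String × String)) (ts : List (List (String × String)))
    (hop : pvIsOp t = true) :
    build_qa_exchanges_alt (t :: ts) = build_qa_exchanges_alt ts := by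
  rw [pvAlt_eq_pvP, pvAlt_eq_pvP]
  have hops : pvOps (t :: ts) 0 = 0 :: (pvOps ts 0).map (· + 1) := by
    rw [pvOps_cons, hop, if_pos rfl, pvOps_shift]
    simp
  have hmem : ∀ b ∈ (-1 : Int) :: pvOps ts 0 ++ [(ts.length : Int)], -1 ≤ b := by
    intro b hb
    rcases List.mem_cons.mp hb with rfl | hb
    · exact le_refl _
    rcases List.mem_append.mp hb with h1 | h1
    · exact le_trans (by omega) (pvOps_nonneg ts 0 (le_refl _) b h1)
    · simp only [List.mem_singleton] at h1
      subst h1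
      omega
  have hmap : ((-1 : Int) :: pvOps ts 0 ++ [(ts.length : Int)]).map (· + 1) =
      0 :: ((pvOps ts 0 ++ [(ts.length : Int)]).map (· + 1)) := by
    simp
  calc pvP (t :: ts) ((-1) :: pvOps (t :: ts) 0 ++ [((t :: ts).length : Int)])
      = pvP (t :: ts) ((-1) :: (((-1 : Int) :: pvOps ts 0 ++ [(ts.length : Int)]).map (· + 1))) := by
        rw [hops, hmap]
        simp
    _ = pvP (t :: ts) (((-1 : Int) :: pvOps ts 0 ++ [(ts.length : Int)]).map (· + 1)) := by
        rw [hmap, pvP_head]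
        norm_num
    _ = pvP ts ((-1) :: pvOps ts 0 ++ [(ts.length : Int)]) := pvP_shift1 t ts _ hmem


theorem pvAlt_oprun (u ts : List (List (String × String)))
    (h : ∀ t ∈ u, pvIsOp t = true) :
    build_qa_exchanges_alt (u ++ ts) = build_qa_exchanges_alt ts := by
  induction u with
  | nil => simp
  | cons t u ih =>
    rw [List.cons_append, pvAlt_op t _ (h t (by simp)), ih (fun x hx => h x (by simp [hx]))]


theorem pvAlt_noprun (run rem : List (List (String × String)))
    (hne : run ≠ []) (hall : ∀ t ∈ run, pvIsOp t = false)
    (hrem : rem = [] ∨ ∃ u rest, rem = u :: rest ∧ pvIsOp u = true) :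
    build_qa_exchanges_alt (run ++ rem) = run :: build_qa_exchanges_alt rem := by
  rw [pvAlt_eq_pvP, pvAlt_eq_pvP]
  have hm : 1 ≤ (run.length : Int) := by
    cases run with
    | nil => exact absurd rfl hne
    | cons a l => simp
  have hcsmem : ∀ b ∈ pvOps rem 0 ++ [(rem.length : Int)], -1 ≤ b := by
    intro b hb
    rcases List.mem_append.mp hb with h1 | h1
    · exact le_trans (by omega) (pvOps_nonneg rem 0 (le_refl _) b h1)
    · simp only [List.mem_singleton] at h1
      subst h1
      omega
  have hops : pvOps (run ++ rem) 0 =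
      (pvOps rem 0).map (· + (run.length : Int)) := by
    rw [pvOps_append, pvOps_none run 0 hall, List.nil_append, pvOps_shiftn]
  have hslice : PySem.List.slice (run ++ rem) (some ((-1 : Int) + 1)) (some (run.length : Int)) = run := by
    norm_num
  have hb : (-1 : Int) :: pvOps (run ++ rem) 0 ++ [((run ++ rem).length : Int)] =
      (-1 : Int) :: ((pvOps rem 0 ++ [(rem.length : Int)]).map (· + (run.length : Int))) := by
    rw [hops]
    simp
    omega
  have hcons : ((pvOps rem 0 ++ [(rem.length : Int)]).map (· + (run.length : Int))) =
      ((pvOps rem 0 ++ [(rem.length : Int)]).head! + (run.length : Int)) ::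
        ((pvOps rem 0 ++ [(rem.length : Int)]).tail.map (· + (run.length : Int))) := by
    cases hc : pvOps rem 0 ++ [(rem.length : Int)] with
    | nil => exact absurd hc (by simp)
    | cons c cs => simp
  have hhead : (pvOps rem 0 ++ [(rem.length : Int)]).head! = 0 := by
    rcases hrem with rfl | ⟨u, rest, rfl, hu⟩
    · simp [pvOps, PySem.List.enumerate_nil]
    · rw [pvOps_cons, hu, if_pos rfl]
      simp
  have happ := pvP_append run rem (pvOps rem 0 ++ [(rem.length : Int)]) hcsmem
  rw [hcons, hhead] at happ
  calc pvP (run ++ rem) ((-1) :: pvOps (run ++ rem) 0 ++ [((run ++ rem).length : Int)])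
      = pvP (run ++ rem) ((-1 : Int) :: (0 + (run.length : Int)) ::
          ((pvOps rem 0 ++ [(rem.length : Int)]).tail.map (· + (run.length : Int)))) := by
        rw [hb, hcons, hhead]
    _ = [PySem.List.slice (run ++ rem) (some ((-1 : Int) + 1)) (some (0 + (run.length : Int)))] ++
          pvP (run ++ rem) ((0 + (run.length : Int)) ::
            ((pvOps rem 0 ++ [(rem.length : Int)]).tail.map (· + (run.length : Int)))) := by
        rw [pvP_head, if_pos (by omega)]
    _ = run :: pvP rem (pvOps rem 0 ++ [(rem.length : Int)]) := by
        rw [happ, zero_add, hslice]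
        simp
    _ = run :: pvP rem ((-1) :: pvOps rem 0 ++ [(rem.length : Int)]) := by
        congr 1
        have hcs : pvOps rem 0 ++ [(rem.length : Int)] =
            0 :: (pvOps rem 0 ++ [(rem.length : Int)]).tail := by
          cases hc : pvOps rem 0 ++ [(rem.length : Int)] with
          | nil => exact absurd hc (by simp)
          | cons c cs' =>
            have hc0 : c = 0 := by
              have h2 := hhead
              rw [hc] at h2
              simpa using h2
            rw [hc0]
            simp
        conv_rhs => rw [List.cons_append, hcs]
        rw [pvP_head, if_neg (by omega), List.nil_append, ← hcs]


theorem pvMainB (n : Nat) : ∀ (ts : List (List (String × String))), ts.length ≤ n →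
    build_qa_exchanges_alt ts = pvGF ts := by
  induction n with
  | zero =>
    intro ts h
    have : ts = [] := List.eq_nil_of_length_eq_zero (Nat.le_zero.mp h)
    subst this
    rw [pvAlt_eq_pvP]
    norm_num [pvGF, pvGroups, pvP, pvOps, PySem.List.enumerate_nil]
  | succ n ih =>
    intro ts h
    match ts with
    | [] =>
      rw [pvAlt_eq_pvP]
      norm_num [pvGF, pvGroups, pvP, pvOps, PySem.List.enumerate_nil]
    | t :: rest =>
      have hlen : rest.length ≤ n := by simpa using h
      have hremlen : (pvTakeRun (pvIsOp t) rest).2.length ≤ n :=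
        le_trans (pvTakeRun_len _ _) hlen
      have hsplit := pvTakeRun_split (pvIsOp t) rest
      set r := (pvTakeRun (pvIsOp t) rest).1 with hr
      set rem := (pvTakeRun (pvIsOp t) rest).2 with hrem
      have hgroups := pvGF_group_cons t rest
      rw [← hr, ← hrem] at hgroups
      by_cases hop : pvIsOp t
      · have hallop : ∀ u ∈ t :: r, pvIsOp u = true := by
          intro u hu
          rcases List.mem_cons.mp hu with rfl | hu
          · exact hop
          · rw [hr] at hu; rw [pvTakeRun_all (pvIsOp t) rest u hu, hop]
        have he : t :: rest = (t :: r) ++ rem := by simp [hsplit]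
        calc build_qa_exchanges_alt (t :: rest)
            = build_qa_exchanges_alt ((t :: r) ++ rem) := by rw [← he]
          _ = build_qa_exchanges_alt rem := pvAlt_oprun _ _ hallop
          _ = pvGF rem := ih rem hremlen
          _ = pvGF (t :: rest) := by rw [hgroups, if_pos hop]
      · have hallno : ∀ u ∈ t :: r, pvIsOp u = false := by
          intro u hu
          rcases List.mem_cons.mp hu with rfl | hu
          · simpa using hop
          · rw [hr] at hu; rw [pvTakeRun_all (pvIsOp t) rest u hu]; simpa using hop
        have hrest : rem = [] ∨ ∃ u rest', rem = u :: rest' ∧ pvIsOp u = true := by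
          rcases pvTakeRun_rest (pvIsOp t) rest with hnil | ⟨u, rest', heq, hne⟩
          · left; rw [hrem]; exact hnil
          · right
            refine ⟨u, rest', by rw [hrem]; exact heq, ?_⟩
            simp only [hop] at hne
            simpa using hne
        have he : t :: rest = (t :: r) ++ rem := by simp [hsplit]
        calc build_qa_exchanges_alt (t :: rest)
            = build_qa_exchanges_alt ((t :: r) ++ rem) := by rw [← he]
          _ = (t :: r) :: build_qa_exchanges_alt rem := pvAlt_noprun _ _ (by simp) hallno hrest
          _ = (t :: r) :: pvGF rem := by rw [ih rem hremlen]
          _ = pvGF (t :: rest) := by rw [hgroups, if_neg hop]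

-- ===== VERDICT (by name: the statement is the Claim_ definition above) =====
theorem build_qa_exchanges_spec : Claim_equal_build_qa_exchanges := by
  intro turns _ _
  unfold Spec_build_qa_exchanges build_qa_exchanges
  rw [pvMainB turns.length turns (le_refl _)]
  exact pvMainA turns.length turns (le_refl _)
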